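-- pv_equiv track=rewrite | github.com/MrBrantCode/unitest_baseline | mut_generate/mist_train_cf/cf_65369/solution.py | check_order_min_dist
-- ===== SOURCE A (Python) =====
-- def check_order_min_dist(string1, string2, min_dist):
--     for item in string2:
--         if item in string1:
--             indices = [i for i, x in enumerate(string1) if x == item]
--             if len(indices) > 1:
--                 min_distance = min([indices[i] - indices[i - 1] for i in range(1, len(indices))])
--                 if min_distance < min_dist:
--                     return False
--         else:
--             return False
--     order_string1 = [x for x in string1 if x in string2]
--     return ''.join(order_string1) == string2
-- ===== SOURCE B (Python) =====
-- def check_order_min_dist(string1, string2, min_dist):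
--     # One left-to-right pass over string1 builds: last index per char, running
--     # min gap per recurring char, and the subsequence of chars that are in string2.
--     last = {}
--     mindist = {}
--     filtered = []
--     for i, c in enumerate(string1):
--         if c in last:
--             gap = i - last[c]
--             if c not in mindist or gap < mindist[c]:
--                 mindist[c] = gap
--         last[c] = i
--         if c in string2:
--             filtered.append(c)
--     for c in string2:
--         if c not in last:
--             return False
--         if c in mindist and mindist[c] < min_dist:
--             return False
--     return ''.join(filtered) == string2
-- ===== Notes on version B (the rewrite author's own statement) =====
-- stated objective: alternative
-- what changed: A rebuilds the full index list of string1 and its gap list for every character of string2; B makes one left-to-right pass over string1 maintaining a last-index dict, a running min-gap dict and the filtered subsequence, then verifies string2 by table lookups.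
import Mathlib
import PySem

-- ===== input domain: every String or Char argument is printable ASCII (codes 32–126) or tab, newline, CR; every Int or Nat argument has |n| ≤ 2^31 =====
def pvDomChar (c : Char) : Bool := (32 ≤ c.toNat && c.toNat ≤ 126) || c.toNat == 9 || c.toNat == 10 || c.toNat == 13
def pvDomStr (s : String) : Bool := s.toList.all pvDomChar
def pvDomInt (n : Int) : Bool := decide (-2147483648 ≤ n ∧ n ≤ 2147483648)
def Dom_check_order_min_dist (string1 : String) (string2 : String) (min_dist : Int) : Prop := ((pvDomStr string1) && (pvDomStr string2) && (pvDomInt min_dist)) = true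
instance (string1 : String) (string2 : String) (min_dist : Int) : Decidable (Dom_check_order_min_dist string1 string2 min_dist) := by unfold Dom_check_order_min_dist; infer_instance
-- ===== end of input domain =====

-- B replaces A's per-character re-scans of string1 (index list + gap list per char of
-- string2) by ONE left-to-right pass over string1 building last-index / min-gap
-- dictionaries and the filtered subsequence, then a table-lookup verification loop.

-- ===== PORT A =====
-- for item in string2: 'return False' modelled by a Bool-returning recursion (false = early return fired)
def aLoop (s1 : List Char) (min_dist : Int) : List Char → Bool
  | [] => true
  | item :: rest =>
    if s1.contains item then
      let indices := (PySem.List.enumerate s1 0).filterMap (fun p => if p.2 = item then some p.1 else none)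
      if 1 < indices.length then
        let gaps := (PySem.List.pyRange 1 (indices.length : Int) 1).map
          (fun i => PySem.List.pyGetD indices i 0 - PySem.List.pyGetD indices (i - 1) 0)
        match PySem.List.min? gaps (fun x => x) with
        | some min_distance => if min_distance < min_dist then false else aLoop s1 min_dist rest
        | none => aLoop s1 min_dist rest
      else aLoop s1 min_dist rest
    else false

def check_order_min_dist (string1 : String) (string2 : String) (min_dist : Int) : Bool :=
  let s1 := string1.toList
  let s2 := string2.toList
  if aLoop s1 min_dist s2 then
    -- order_string1 = [x for x in string1 if x in string2]; ''.join of single chars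
    -- compared with string2 is exactly char-list equality
    let order_string1 := s1.filter (fun x => s2.contains x)
    order_string1 == s2
  else false

-- ===== PORT B =====
-- one pass over enumerate(string1) carrying the (last, mindist, filtered) state
def bStep (s2 : List Char) (st : PySem.Dict Char Int × PySem.Dict Char Int × List Char)
    (p : Int × Char) : PySem.Dict Char Int × PySem.Dict Char Int × List Char :=
  let last := st.1
  let mindist := st.2.1
  let filtered := st.2.2
  let i := p.1
  let c := p.2
  let mindist' :=
    match last.get? c with
    | some j =>
      let gap := i - j
      if (!mindist.contains c) || decide (gap < mindist.getD c 0) then mindist.insert c gap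
      else mindist
    | none => mindist
  let last' := last.insert c i
  let filtered' := if s2.contains c then filtered ++ [c] else filtered
  (last', mindist', filtered')

-- for c in string2: early return modelled as in aLoop
def bLoop (last : PySem.Dict Char Int) (mindist : PySem.Dict Char Int) (min_dist : Int) :
    List Char → Bool
  | [] => true
  | c :: rest =>
    if !last.contains c then false
    else if mindist.contains c && decide (mindist.getD c 0 < min_dist) then false
    else bLoop last mindist min_dist rest

def check_order_min_dist_alt (string1 : String) (string2 : String) (min_dist : Int) : Bool :=
  let s1 := string1.toList
  let s2 := string2.toList
  let st := (PySem.List.enumerate s1 0).foldl (bStep s2) (PySem.Dict.empty, PySem.Dict.empty, [])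
  bLoop st.1 st.2.1 min_dist s2 && (st.2.2 == s2)

-- ===== PRECONDITION & SPEC =====
def Spec_check_order_min_dist (string1 : String) (string2 : String) (min_dist : Int) (out : Bool) : Prop := out = check_order_min_dist_alt string1 string2 min_dist
instance (string1 : String) (string2 : String) (min_dist : Int) (out : Bool) : Decidable (Spec_check_order_min_dist string1 string2 min_dist out) := by unfold Spec_check_order_min_dist; infer_instance

-- ===== CLAIM (what is proved, stated in full; the proofs are below) =====
def Claim_equal_check_order_min_dist : Prop := ∀ (string1 : String) (string2 : String) (min_dist : Int), Dom_check_order_min_dist string1 string2 min_dist → Spec_check_order_min_dist string1 string2 min_dist (check_order_min_dist string1 string2 min_dist)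

-- ===== LEMMAS AND PROOFS =====
def occIF (l : List Char) (c : Char) (s : Int) : List Int :=
  (PySem.List.enumerate l s).filterMap (fun p => if p.2 = c then some p.1 else none)

def gapsL : List Int → List Int
  | a :: b :: t => (b - a) :: gapsL (b :: t)
  | _ => []

theorem occIF_append_singleton (l : List Char) (x c : Char) (s : Int) :
    occIF (l ++ [x]) c s = occIF l c s ++ (if x = c then [s + l.length] else []) := by
  simp [occIF, PySem.List.enumerate_append, PySem.List.enumerate_cons, PySem.List.enumerate_nil]
  split <;> simp_all

theorem occIF_eq_nil_iff (l : List Char) (c : Char) (s : Int) :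
    occIF l c s = [] ↔ c ∉ l := by
  induction l generalizing s with
  | nil => simp [occIF, PySem.List.enumerate_nil]
  | cons a t ih =>
    simp only [occIF, PySem.List.enumerate_cons, List.filterMap_cons]
    by_cases h : a = c
    · simp [h]
    · simpa [h, occIF, Ne.symm h] using ih (s + 1)

theorem gapsL_eq_zipWith (idx : List Int) :
    gapsL idx = List.zipWith (fun x y => x - y) idx.tail idx := by
  induction idx with
  | nil => rfl
  | cons b t ih =>
    cases t with
    | nil => rfl
    | cons c t' => simpa [gapsL] using ih

theorem gapsL_append_singleton (idx : List Int) (j a : Int) (h : idx.getLast? = some j) :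
    gapsL (idx ++ [a]) = gapsL idx ++ [a - j] := by
  induction idx with
  | nil => simp at h
  | cons b t ih =>
    cases t with
    | nil => simp at h; subst h; simp [gapsL]
    | cons c t' =>
      have h' : (c :: t').getLast? = some j := by simpa using h
      show (c - b) :: gapsL ((c :: t') ++ [a]) = ((c - b) :: gapsL (c :: t')) ++ [a - j]
      rw [ih h']
      simp

theorem gapsL_eq_nil_iff (idx : List Int) : gapsL idx = [] ↔ idx.length ≤ 1 := by
  match idx with
  | [] => simp [gapsL]
  | [b] => simp [gapsL]
  | b :: c :: t => simp [gapsL]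

theorem aGaps_eq_gapsL (idx : List Int) :
    (PySem.List.pyRange 1 (idx.length : Int) 1).map
      (fun i => PySem.List.pyGetD idx i 0 - PySem.List.pyGetD idx (i - 1) 0) = gapsL idx := by
  rw [gapsL_eq_zipWith]
  apply List.ext_getElem
  · simp [PySem.List.length_pyRange_one]
  · intro k h1 h2
    simp only [List.getElem_map, PySem.List.getElem_pyRange_one, List.getElem_zipWith,
      List.getElem_tail]
    have hk : k + 1 < idx.length := by
      simp [PySem.List.length_pyRange_one] at h1; omega
    have e1 : (1 : Int) + k = ((k + 1 : Nat) : Int) := by push_cast; ring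
    have e2 : ((k + 1 : Nat) : Int) - 1 = ((k : Nat) : Int) := by push_cast; ring
    rw [e1, e2, PySem.List.pyGetD_natCast, PySem.List.pyGetD_natCast,
      List.getD_eq_getElem _ _ hk, List.getD_eq_getElem _ _ (by omega)]

def minGap? (l : List Char) (c : Char) : Option Int :=
  match gapsL (occIF l c 0) with
  | [] => none
  | g :: t => some (t.foldl min g)

theorem bStep_fst (s2 : List Char) (st : PySem.Dict Char Int × PySem.Dict Char Int × List Char)
    (i : Int) (c : Char) : (bStep s2 st (i, c)).1 = st.1.insert c i := rfl

theorem bStep_filtered (s2 : List Char) (st : PySem.Dict Char Int × PySem.Dict Char Int × List Char)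
    (i : Int) (c : Char) :
    (bStep s2 st (i, c)).2.2 = if s2.contains c then st.2.2 ++ [c] else st.2.2 := rfl

theorem bStep_mindist_none (s2 : List Char) (st : PySem.Dict Char Int × PySem.Dict Char Int × List Char)
    (i : Int) (c : Char) (h : st.1.get? c = none) : (bStep s2 st (i, c)).2.1 = st.2.1 := by
  simp [bStep, h]

theorem bStep_mindist_some (s2 : List Char) (st : PySem.Dict Char Int × PySem.Dict Char Int × List Char)
    (i : Int) (c : Char) (j : Int) (h : st.1.get? c = some j) :
    (bStep s2 st (i, c)).2.1 =
      if (!st.2.1.contains c) || decide (i - j < st.2.1.getD c 0) then st.2.1.insert c (i - j)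
      else st.2.1 := by
  simp [bStep, h]

theorem foldInv (s2 : List Char) (l : List Char) :
    (∀ c, ((PySem.List.enumerate l 0).foldl (bStep s2)
        (PySem.Dict.empty, PySem.Dict.empty, [])).1.get? c = (occIF l c 0).getLast?) ∧
    (∀ c, ((PySem.List.enumerate l 0).foldl (bStep s2)
        (PySem.Dict.empty, PySem.Dict.empty, [])).2.1.get? c = minGap? l c) ∧
    ((PySem.List.enumerate l 0).foldl (bStep s2)
        (PySem.Dict.empty, PySem.Dict.empty, [])).2.2 = l.filter (fun x => s2.contains x) := by
  induction l using List.reverseRecOn with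
  | nil =>
    refine ⟨?_, ?_, ?_⟩ <;>
      simp [occIF, minGap?, gapsL, PySem.List.enumerate_nil, PySem.Dict.get?_empty]
  | append_singleton l x ih =>
    obtain ⟨ih1, ih2, ih3⟩ := ih
    have hE : PySem.List.enumerate (l ++ [x]) 0
        = PySem.List.enumerate l 0 ++ [((l.length : Int), x)] := by
      simp [PySem.List.enumerate_append, PySem.List.enumerate_cons, PySem.List.enumerate_nil]
    rw [hE, List.foldl_append]
    simp only [List.foldl_cons, List.foldl_nil]
    refine ⟨?_, ?_, ?_⟩
    · intro c
      rw [bStep_fst, PySem.Dict.get?_insert, occIF_append_singleton]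
      by_cases hcx : c = x
      · subst hcx; simp
      · simp [hcx, Ne.symm hcx, ih1 c]
    · intro c
      by_cases hcx : c = x
      · subst hcx
        rcases hgx : (List.foldl (bStep s2) (PySem.Dict.empty, PySem.Dict.empty, [])
            (PySem.List.enumerate l 0)).1.get? c with _ | j
        · rw [bStep_mindist_none _ _ _ _ hgx]
          have hocc : occIF l c 0 = [] := by
            have h := ih1 c; rw [hgx] at h
            exact List.getLast?_eq_none_iff.mp h.symm
          rw [ih2 c]
          simp [minGap?, occIF_append_singleton, hocc, gapsL]
        · rw [bStep_mindist_some _ _ _ _ _ hgx]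
          have hlastocc : (occIF l c 0).getLast? = some j := by
            have h := ih1 c; rw [hgx] at h; exact h.symm
          have hnew : minGap? (l ++ [c]) c
              = match gapsL (occIF l c 0) ++ [(l.length : Int) - j] with
                | [] => none
                | g :: t => some (t.foldl min g) := by
            have hoccnew : occIF (l ++ [c]) c 0 = occIF l c 0 ++ [(l.length : Int)] := by
              rw [occIF_append_singleton]; simp
            simp only [minGap?, hoccnew, gapsL_append_singleton _ j _ hlastocc]
          rcases hg : gapsL (occIF l c 0) with _ | ⟨g, t⟩
          · have hcontains : (List.foldl (bStep s2) (PySem.Dict.empty, PySem.Dict.empty, [])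
                (PySem.List.enumerate l 0)).2.1.contains c = false := by
              rw [PySem.Dict.contains_eq_isSome_get?, ih2 c]
              simp [minGap?, hg]
            simp only [hcontains, Bool.not_false, Bool.true_or, if_pos]
            rw [PySem.Dict.get?_insert_self, hnew, hg]
            simp
          · have hm : (List.foldl (bStep s2) (PySem.Dict.empty, PySem.Dict.empty, [])
                (PySem.List.enumerate l 0)).2.1.get? c = some (t.foldl min g) := by
              rw [ih2 c]; simp [minGap?, hg]
            have hcontains : (List.foldl (bStep s2) (PySem.Dict.empty, PySem.Dict.empty, [])
                (PySem.List.enumerate l 0)).2.1.contains c = true := by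
              rw [PySem.Dict.contains_eq_isSome_get?, hm]; rfl
            have hgetD : (List.foldl (bStep s2) (PySem.Dict.empty, PySem.Dict.empty, [])
                (PySem.List.enumerate l 0)).2.1.getD c 0 = t.foldl min g := by
              rw [PySem.Dict.getD_eq_get?_getD, hm]; rfl
            rw [hnew, hg]
            simp only [hcontains, Bool.not_true, Bool.false_or, hgetD, List.cons_append,
              List.foldl_append, List.foldl_cons, List.foldl_nil]
            split_ifs with hlt
            · rw [PySem.Dict.get?_insert_self]
              simp at hlt
              congr 1
              omega
            · rw [hm]
              simp at hlt
              congr 1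
              omega
      · have hocc : occIF (l ++ [x]) c 0 = occIF l c 0 := by
          have hxc : ¬ x = c := fun h => hcx h.symm
          rw [occIF_append_singleton]; simp [hxc]
        have hmg : minGap? (l ++ [x]) c = minGap? l c := by
          simp [minGap?, hocc]
        rw [hmg, ← ih2 c]
        rcases hgx : (List.foldl (bStep s2) (PySem.Dict.empty, PySem.Dict.empty, [])
            (PySem.List.enumerate l 0)).1.get? x with _ | j
        · rw [bStep_mindist_none _ _ _ _ hgx]
        · rw [bStep_mindist_some _ _ _ _ _ hgx]
          split_ifs with h
          · exact PySem.Dict.get?_insert_of_ne _ _ hcx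
          · rfl
    · rw [bStep_filtered, ih3, List.filter_append]
      cases h : s2.contains x <;> simp_all [List.contains_eq_mem]

theorem loops_eq (s1 : List Char) (min_dist : Int) (last mindist : PySem.Dict Char Int)
    (hlast : ∀ c, last.get? c = (occIF s1 c 0).getLast?)
    (hmin : ∀ c, mindist.get? c = minGap? s1 c) (s2 : List Char) :
    aLoop s1 min_dist s2 = bLoop last mindist min_dist s2 := by
  induction s2 with
  | nil => rfl
  | cons c rest ih =>
    have hidx : occIF s1 c 0
        = (PySem.List.enumerate s1 0).filterMap (fun p => if p.2 = c then some p.1 else none) := rfl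
    have hcont : last.contains c = s1.contains c := by
      rw [PySem.Dict.contains_eq_isSome_get?, hlast c]
      cases hmem : s1.contains c
      · have hnm : c ∉ s1 := by simp_all [List.contains_eq_mem]
        rw [(occIF_eq_nil_iff s1 c 0).mpr hnm]; rfl
      · have hm : c ∈ s1 := by simp_all [List.contains_eq_mem]
        have hne : occIF s1 c 0 ≠ [] := fun h => ((occIF_eq_nil_iff s1 c 0).mp h) hm
        simp [Option.isSome_iff_ne_none, List.getLast?_eq_none_iff, hne]
    simp only [aLoop, bLoop, hcont]
    cases hmem : s1.contains c
    · simp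
    · simp only [Bool.not_true, Bool.false_eq_true, if_false]
      rw [← hidx, aGaps_eq_gapsL]
      by_cases hlen : 1 < (occIF s1 c 0).length
      · rcases hg : gapsL (occIF s1 c 0) with _ | ⟨g, t⟩
        · exact absurd ((gapsL_eq_nil_iff _).mp hg) (by omega)
        · have hmc : mindist.get? c = some (t.foldl min g) := by
            rw [hmin c]; simp [minGap?, hg]
          have hcontains : mindist.contains c = true := by
            rw [PySem.Dict.contains_eq_isSome_get?, hmc]; rfl
          have hgetD : mindist.getD c 0 = t.foldl min g := by
            rw [PySem.Dict.getD_eq_get?_getD, hmc]; rfl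
          rw [if_pos hlen, PySem.List.min?_id_cons]
          simp only [hcontains, hgetD, Bool.true_and]
          by_cases hlt : t.foldl min g < min_dist
          · simp [hlt]
          · simp [hlt, ih]
      · rw [if_neg hlen]
        have hg : gapsL (occIF s1 c 0) = [] := (gapsL_eq_nil_iff _).mpr (by omega)
        have hmc : mindist.get? c = none := by rw [hmin c]; simp [minGap?, hg]
        have hcontains : mindist.contains c = false := by
          rw [PySem.Dict.contains_eq_isSome_get?, hmc]; rfl
        simp [hcontains, ih]

-- ===== VERDICT (by name: the statement is the Claim_ definition above) =====
theorem check_order_min_dist_spec : Claim_equal_check_order_min_dist := by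
  intro string1 string2 min_dist _
  unfold Spec_check_order_min_dist
  simp only [check_order_min_dist, check_order_min_dist_alt]
  obtain ⟨h1, h2, h3⟩ := foldInv string2.toList string1.toList
  rw [loops_eq string1.toList min_dist _ _ h1 h2 string2.toList, h3]
  cases bLoop _ _ min_dist string2.toList <;> simp
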